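-- pv_equiv track=rewrite | github.com/pavanb0/typing_speed_checker_python_consol | typing_speed_checker_python_consol_with_oop.py | wpma_pass
-- ===== SOURCE A (Python) =====
-- def wpma_pass (host, guest, length):  # this function takes two lists and compare every element of host with guest
--     flag_1 = 0
--     flag_2 = 0
--     while True:
--         for i in range(length):
--             if guest[i] in host:
--                 flag_1 = flag_1 + 1
--             if guest[i] not in host:
--                 flag_2 = flag_2 + 1
--         return [flag_1, flag_2];
--         break;
-- ===== SOURCE B (Python) =====
-- def wpma_pass(host, guest, length):
--     # Group the inspected guest elements by value first (a counting dict),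
--     # then classify each DISTINCT value once against a set of host.
--     counts = {}
--     for i in range(length):
--         v = guest[i]
--         counts[v] = counts.get(v, 0) + 1
--     hostset = set(host)
--     flag_1 = 0
--     flag_2 = 0
--     for v, c in counts.items():
--         if v in hostset:
--             flag_1 += c
--         else:
--             flag_2 += c
--     return [flag_1, flag_2]
-- ===== Notes on version B (the rewrite author's own statement) =====
-- stated objective: faster
-- what changed: Instead of A's per-element two-branch loop scanning the host list for every guest element, B first groups the inspected guest elements by value in a counting dict, builds a set of host once, and classifies each DISTINCT value a single time, adding its multiplicity to the hit or miss counter.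
import Mathlib
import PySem

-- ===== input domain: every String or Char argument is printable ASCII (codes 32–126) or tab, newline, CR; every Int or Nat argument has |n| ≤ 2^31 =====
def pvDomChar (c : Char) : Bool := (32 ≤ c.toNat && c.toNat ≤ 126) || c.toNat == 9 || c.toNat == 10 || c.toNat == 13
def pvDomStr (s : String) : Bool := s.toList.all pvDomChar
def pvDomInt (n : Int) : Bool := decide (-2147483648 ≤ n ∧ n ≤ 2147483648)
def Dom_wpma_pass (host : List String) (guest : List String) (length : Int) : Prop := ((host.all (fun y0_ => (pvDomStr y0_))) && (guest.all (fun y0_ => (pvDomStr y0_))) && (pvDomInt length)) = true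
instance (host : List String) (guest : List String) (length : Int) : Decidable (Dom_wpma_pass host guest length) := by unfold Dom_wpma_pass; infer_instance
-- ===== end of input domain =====

-- B groups the inspected guest elements by value in a counting dict and classifies
-- each DISTINCT value once against a set of host, adding multiplicities (faster:
-- one membership scan per distinct value instead of per element).

-- ===== PORT A =====
-- for i in range(length): two independent ifs updating flag_1 / flag_2; 'guest[i]' ported
-- with pyGet? (inside Pre_ the index is always in range, so getD "" is never reached)
def wpma_pass (host : List String) (guest : List String) (length : Int) : List Int :=
  let st := (PySem.List.pyRange 0 length 1).foldl
    (fun (fl : Int × Int) i =>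
      let g := (PySem.List.pyGet? guest i).getD ""
      let f1 := if host.contains g then fl.1 + 1 else fl.1
      let f2 := if !(host.contains g) then fl.2 + 1 else fl.2
      (f1, f2)) (0, 0)
  [st.1, st.2]

-- ===== PORT B =====
-- counts: dict built over range(length); then set(host); then one loop over counts.items()
def wpma_pass_alt (host : List String) (guest : List String) (length : Int) : List Int :=
  let counts := (PySem.List.pyRange 0 length 1).foldl
    (fun (d : PySem.Dict String Int) i =>
      let v := (PySem.List.pyGet? guest i).getD ""
      d.insert v (d.getD v 0 + 1)) PySem.Dict.empty
  let hostset : PySem.Set String := PySem.Set.ofList host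
  let st := counts.items.foldl
    (fun (fl : Int × Int) p =>
      if PySem.Set.contains hostset p.1 then (fl.1 + p.2, fl.2) else (fl.1, fl.2 + p.2))
    (0, 0)
  [st.1, st.2]

-- ===== PRECONDITION & SPEC =====
-- A (and B) raise IndexError exactly when length exceeds len(guest); nothing else is excluded.
def Pre_wpma_pass (_host : List String) (guest : List String) (length : Int) : Prop :=
  length ≤ (guest.length : Int)
instance (host : List String) (guest : List String) (length : Int) : Decidable (Pre_wpma_pass host guest length) := by unfold Pre_wpma_pass; infer_instance

def pvWitness_wpma_pass : List String × List String × Int := (["x", "y"], ["x", "z", "y"], 3)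

def Spec_wpma_pass (host : List String) (guest : List String) (length : Int) (out : List Int) : Prop := out = wpma_pass_alt host guest length
instance (host : List String) (guest : List String) (length : Int) (out : List Int) : Decidable (Spec_wpma_pass host guest length out) := by unfold Spec_wpma_pass; infer_instance

-- ===== CLAIM (what is proved, stated in full; the proofs are below) =====
def Claim_equal_wpma_pass : Prop := ∀ (host : List String) (guest : List String) (length : Int), Dom_wpma_pass host guest length → Pre_wpma_pass host guest length → Spec_wpma_pass host guest length (wpma_pass host guest length)

-- ===== LEMMAS AND PROOFS =====

-- A's per-element pair fold counts hits and misses: (countP p, countP !p), shifted by the start state.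
theorem pair_fold_countP (p : String → Bool) :
    ∀ (l : List String) (a b : Int),
      l.foldl (fun (fl : Int × Int) x =>
        (if p x then fl.1 + 1 else fl.1,
         if !(p x) then fl.2 + 1 else fl.2)) (a, b)
      = (a + l.countP p, b + l.countP (fun x => !p x)) := by
  intro l
  induction l with
  | nil => intro a b; simp
  | cons x xs ih =>
    intro a b
    simp only [List.foldl_cons, List.countP_cons]
    by_cases h : p x
    · rw [if_pos h, if_neg (by simp [h]), ih]
      simp [h]
      all_goals omega
    · rw [if_neg h, if_pos (by simp [h]), ih]
      simp [h]
      all_goals omega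

-- splitting countP at one value v: the occurrences of v plus the rest
theorem countP_split (p : String → Bool) (v : String) (xs : List String) :
    xs.countP p
    = (if p v then xs.count v else 0) + (xs.filter (fun x => x ≠ v)).countP p := by
  induction xs with
  | nil => simp
  | cons x t ih =>
    rw [List.countP_cons, List.count_cons, List.filter_cons]
    by_cases hx : x = v
    · subst hx
      by_cases hp : p x <;> simp only [hp, if_true, decide_eq_true_eq] <;> simp [ih, hp] <;> omega
    · by_cases hp : p x <;> simp only [hp, decide_eq_true_eq] <;> simp [ih, hx, hp] <;> split_ifs <;> omega

-- grouped fold over any nodup list l covering the values of xs: summing counts by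
-- distinct value reproduces the per-element counts.
theorem grouped_fold (p : String → Bool) :
    ∀ (l : List String) (xs : List String) (a b : Int), l.Nodup → (∀ x ∈ xs, x ∈ l) →
      l.foldl (fun (fl : Int × Int) k =>
          if p k then (fl.1 + xs.count k, fl.2) else (fl.1, fl.2 + xs.count k)) (a, b)
      = (a + xs.countP p, b + xs.countP (fun x => !p x)) := by
  intro l
  induction l with
  | nil =>
    intro xs a b _ hcov
    have hnil : xs = [] := List.eq_nil_iff_forall_not_mem.mpr (fun x hx => by simpa using hcov x hx)
    subst hnil; simp
  | cons v l' ih =>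
    intro xs a b hnd hcov
    have hv : v ∉ l' := (List.nodup_cons.mp hnd).1
    have hnd' : l'.Nodup := (List.nodup_cons.mp hnd).2
    set xs' := xs.filter (fun x => x ≠ v) with hxs'
    have hcov' : ∀ x ∈ xs', x ∈ l' := by
      intro x hx
      have hmem := List.mem_of_mem_filter hx
      have hne : x ≠ v := by
        have := List.of_mem_filter hx; simpa using this
      rcases List.mem_cons.mp (hcov x hmem) with h | h
      · exact absurd h hne
      · exact h
    have hcnt : ∀ k ∈ l', xs'.count k = xs.count k := by
      intro k hk
      have hkv : k ≠ v := fun h => hv (h ▸ hk)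
      exact List.count_filter (by simpa using hkv)
    have hcongr :
        ∀ (init : Int × Int),
          l'.foldl (fun (fl : Int × Int) k =>
            if p k then (fl.1 + xs.count k, fl.2) else (fl.1, fl.2 + xs.count k)) init
          = l'.foldl (fun (fl : Int × Int) k =>
            if p k then (fl.1 + xs'.count k, fl.2) else (fl.1, fl.2 + xs'.count k)) init := by
      intro init
      apply PySem.List.foldl_congr_mem
      intro acc x hx
      rw [hcnt x hx]
    have h1 := countP_split p v xs
    have h2 := countP_split (fun x => !p x) v xs
    rw [← hxs'] at h1 h2
    simp only [List.foldl_cons]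
    by_cases hp : p v
    · rw [if_pos hp, hcongr, ih xs' _ _ hnd' hcov']
      rw [if_pos hp] at h1
      rw [if_neg (by simp [hp])] at h2
      simp only [Prod.mk.injEq]
      constructor <;> push_cast [h1, h2] <;> ring
    · rw [if_neg hp, hcongr, ih xs' _ _ hnd' hcov']
      rw [if_neg hp] at h1
      rw [if_pos (by simp [hp])] at h2
      simp only [Prod.mk.injEq]
      constructor <;> push_cast [h1, h2] <;> ring

-- ===== VERDICT (by name: the statement is the Claim_ definition above) =====
theorem wpma_pass_spec : Claim_equal_wpma_pass := by
  intro host guest length _ _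
  unfold Spec_wpma_pass wpma_pass wpma_pass_alt
  simp only []
  set pfx := (PySem.List.pyRange 0 length 1).map
    (fun i => (PySem.List.pyGet? guest i).getD "") with hpfx
  -- A side: the range fold is the pair count over the fetched prefix
  have hA :
      (PySem.List.pyRange 0 length 1).foldl
        (fun (fl : Int × Int) i =>
          let g := (PySem.List.pyGet? guest i).getD ""
          (if host.contains g then fl.1 + 1 else fl.1,
           if !(host.contains g) then fl.2 + 1 else fl.2)) (0, 0)
      = ((0 : Int) + pfx.countP (fun x => host.contains x),
         (0 : Int) + pfx.countP (fun x => !(host.contains x))) := by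
    rw [← pair_fold_countP (fun x => host.contains x) pfx 0 0, hpfx]
    rw [List.foldl_map]
  -- B side: the dict is the counter of the fetched prefix …
  have hdict :
      (PySem.List.pyRange 0 length 1).foldl
        (fun (d : PySem.Dict String Int) i =>
          let v := (PySem.List.pyGet? guest i).getD ""
          d.insert v (d.getD v 0 + 1)) PySem.Dict.empty
      = PySem.Dict.counter pfx := by
    rw [← PySem.Dict.foldl_insert_getD_add_one_eq_counter pfx, hpfx]
    rw [List.foldl_map]
  -- … membership in set(host) is membership in host …
  have hp_eq : ∀ k : String,
      PySem.Set.contains (PySem.Set.ofList host) k = host.contains k := by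
    intro k
    simp only [PySem.Set.contains_eq_listContains]
    by_cases h : k ∈ host <;> simp [h, PySem.Set.mem_ofList]
  -- … and the items fold groups the same counts by distinct value
  have hB :
      (PySem.Dict.counter pfx).items.foldl
        (fun (fl : Int × Int) p =>
          if PySem.Set.contains (PySem.Set.ofList host) p.1
          then (fl.1 + p.2, fl.2) else (fl.1, fl.2 + p.2)) (0, 0)
      = ((0 : Int) + pfx.countP (fun x => host.contains x),
         (0 : Int) + pfx.countP (fun x => !(host.contains x))) := by
    rw [PySem.Dict.items_counter, List.foldl_map]
    simp only [hp_eq]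
    exact grouped_fold (fun x => host.contains x)
      (PySem.Set.ofList pfx) pfx 0 0 (PySem.Set.nodup_ofList pfx)
      (fun x hx => (PySem.Set.mem_ofList pfx x).mpr hx)
  rw [hA, hdict, hB]
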